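-- pv_equiv track=rewrite | github.com/Vict0r-David/UNIPG | Proba_Arg/Old_files/Old_Programs/Experimentations/auto_MCN.py | order_level
-- ===== SOURCE A (Python) =====
-- def heapify(arr, n, i):
--     largest = i  # Initialize largest as root
--     l = 2 * i + 1  # left = 2*i + 1
--     r = 2 * i + 2  # right = 2*i + 2
--     # See if left child of root exists and is
--     # greater than root
--     if l < n and arr[i][1] < arr[l][1]:
--         largest = l
--
--     # See if right child of root exists and is
--     # greater than root
--     if r < n and arr[largest][1] < arr[r][1]:
--         largest = r
--
--     # Change root, if needed
--     if largest != i: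
--         (arr[i], arr[largest]) = (arr[largest], arr[i])  # swap
--         # Heapify the root.
--         heapify(arr, n, largest)
--
-- def heapSort(arr):
--     n = len(arr)
--     # Build a maxheap.
--     # Since last parent will be at ((n//2)-1) we can start at that location.
--     for i in range(n // 2 - 1, -1, -1):
--         heapify(arr, n, i)
--     # One by one extract elements
--     for i in range(n - 1, 0, -1):
--         (arr[i], arr[0]) = (arr[0], arr[i])  # swap
--         heapify(arr, i, 0)
--
-- def order_level(start,dico_lvl):
--     liste = []
--     add = False
--     for arg,val in dico_lvl.items():
--             if val > 0 or arg == start: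
--                 liste.append([arg,val])
--     heapSort(liste)
--     #size = len(liste)
--     #quickSort(liste, 0, size - 1)
--     return liste
-- ===== SOURCE B (Python) =====
-- def _siftdown(arr, n, i):
--     # iterative sift-down: pick the larger child, swap down while the node is smaller
--     while 2 * i + 1 < n:
--         c = 2 * i + 1
--         if c + 1 < n and arr[c][1] < arr[c + 1][1]:
--             c += 1
--         if arr[i][1] < arr[c][1]:
--             (arr[i], arr[c]) = (arr[c], arr[i])
--             i = c
--         else:
--             break
--
-- def _heapsort(arr):
--     n = len(arr)
--     i = n // 2 - 1
--     while i >= 0: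
--         _siftdown(arr, n, i)
--         i -= 1
--     i = n - 1
--     while i > 0:
--         (arr[i], arr[0]) = (arr[0], arr[i])
--         _siftdown(arr, i, 0)
--         i -= 1
--
-- def order_level(start, dico_lvl):
--     liste = [[arg, val] for arg, val in dico_lvl.items() if val > 0 or arg == start]
--     _heapsort(liste)
--     return liste
-- ===== Notes on version B (the rewrite author's own statement) =====
-- stated objective: alternative
-- what changed: The recursive sift-down (root compared against each child, then tail-recursion) is replaced by an iterative larger-child loop (pick the bigger child, swap down or break), and the two for-range passes become explicit while loops; the filter becomes a comprehension. Same heapsort swaps, so identical output including tie order.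
import Mathlib
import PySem

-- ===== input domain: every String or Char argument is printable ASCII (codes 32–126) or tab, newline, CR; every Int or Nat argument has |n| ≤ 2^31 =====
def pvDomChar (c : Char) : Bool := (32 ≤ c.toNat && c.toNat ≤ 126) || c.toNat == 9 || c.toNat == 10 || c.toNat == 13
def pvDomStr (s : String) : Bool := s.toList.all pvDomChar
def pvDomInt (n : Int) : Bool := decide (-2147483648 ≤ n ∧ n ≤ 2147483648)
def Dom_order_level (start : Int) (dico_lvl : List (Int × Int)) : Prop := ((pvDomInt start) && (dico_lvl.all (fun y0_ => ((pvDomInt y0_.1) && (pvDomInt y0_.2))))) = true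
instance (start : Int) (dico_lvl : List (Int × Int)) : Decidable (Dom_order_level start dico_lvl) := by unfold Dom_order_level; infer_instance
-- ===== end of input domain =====

-- B keeps A's filter + heapsort but replaces the recursive sift-down by an iterative larger-child
-- loop and the for-ranges by while loops (objective: alternative decomposition, same output order).
-- Python A mutates no caller-visible argument (dico_lvl is only read; liste is local).

-- shared array helpers: arr[i][1] and the tuple swap (arr[i], arr[j]) = (arr[j], arr[i]).
-- All indices reached by either algorithm are in range, so getD/set are exact here.
def pvVal (arr : List (List Int)) (i : Nat) : Int := (arr.getD i []).getD 1 0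
def pvSwap (arr : List (List Int)) (i j : Nat) : List (List Int) :=
  (arr.set i (arr.getD j [])).set j (arr.getD i [])

-- ===== PORT A =====
-- recursive heapify(arr, n, i); fuel only makes the recursion structural: each recursive call
-- strictly increases i < n, so fuel n+1 (as passed below) is never exhausted.
def heapifyA : Nat → List (List Int) → Nat → Nat → List (List Int)
  | 0, arr, _, _ => arr
  | fuel+1, arr, n, i =>
    let l := 2*i+1
    let r := 2*i+2
    let largest := if l < n ∧ pvVal arr i < pvVal arr l then l else i
    let largest2 := if r < n ∧ pvVal arr largest < pvVal arr r then r else largest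
    if largest2 ≠ i then heapifyA fuel (pvSwap arr i largest2) n largest2 else arr

-- heapSort: for i in range(n//2-1,-1,-1) is the descending list (range (n/2)).reverse;
-- for i in range(n-1,0,-1) is the descending list (range' 1 (n-1)).reverse — exact for every n.
def heapSortA (arr : List (List Int)) : List (List Int) :=
  let n := arr.length
  let a1 := (List.range (n/2)).reverse.foldl (fun a i => heapifyA (n+1) a n i) arr
  (List.range' 1 (n-1)).reverse.foldl (fun a i => heapifyA (i+1) (pvSwap a i 0) i 0) a1

def order_level (start : Int) (dico_lvl : List (Int × Int)) : List (List Int) :=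
  heapSortA (dico_lvl.foldl
    (fun liste p => if p.2 > 0 ∨ p.1 = start then liste ++ [[p.1, p.2]] else liste) [])

-- ===== PORT B =====
-- iterative sift-down: while the left child exists, pick the larger child c, swap down if
-- smaller, else break.  Same fuel discipline as A's port (never exhausted).
def siftB : Nat → List (List Int) → Nat → Nat → List (List Int)
  | 0, arr, _, _ => arr
  | fuel+1, arr, n, i =>
    if 2*i+1 < n then
      let c := 2*i+1
      let c := if c+1 < n ∧ pvVal arr c < pvVal arr (c+1) then c+1 else c
      if pvVal arr i < pvVal arr c then siftB fuel (pvSwap arr i c) n c else arr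
    else arr

-- while i >= 0 loop of _heapsort, counter k = i+1
def buildB (n : Nat) : Nat → List (List Int) → List (List Int)
  | 0, arr => arr
  | k+1, arr => buildB n k (siftB (n+1) arr n k)

-- while i > 0 loop of _heapsort
def extractB : Nat → List (List Int) → List (List Int)
  | 0, arr => arr
  | i+1, arr => extractB i (siftB (i+2) (pvSwap arr (i+1) 0) (i+1) 0)

def heapSortB (arr : List (List Int)) : List (List Int) :=
  let n := arr.length
  extractB (n-1) (buildB n (n/2) arr)

def order_level_alt (start : Int) (dico_lvl : List (Int × Int)) : List (List Int) :=
  heapSortB ((dico_lvl.filter (fun p => decide (p.2 > 0) || decide (p.1 = start))).map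
    (fun p => [p.1, p.2]))

-- ===== PRECONDITION & SPEC =====
def Spec_order_level (start : Int) (dico_lvl : List (Int × Int)) (out : List (List Int)) : Prop := out = order_level_alt start dico_lvl
instance (start : Int) (dico_lvl : List (Int × Int)) (out : List (List Int)) : Decidable (Spec_order_level start dico_lvl out) := by unfold Spec_order_level; infer_instance

-- ===== CLAIM (what is proved, stated in full; the proofs are below) =====
def Claim_equal_order_level : Prop := ∀ (start : Int) (dico_lvl : List (Int × Int)), Dom_order_level start dico_lvl → Spec_order_level start dico_lvl (order_level start dico_lvl)

-- ===== LEMMAS AND PROOFS =====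

-- the two sift-downs take the same swaps: case analysis on which children exist and compare
theorem sift_eq : ∀ (fuel : Nat) (arr : List (List Int)) (n i : Nat),
    heapifyA fuel arr n i = siftB fuel arr n i := by
  intro fuel
  induction fuel with
  | zero => intro arr n i; rfl
  | succ f ih =>
    intro arr n i
    simp only [heapifyA, siftB]
    by_cases h1 : 2*i+1 < n
    · by_cases h2 : 2*i+2 < n
      · by_cases hlr : pvVal arr (2*i+1) < pvVal arr (2*i+2)
        · by_cases hil : pvVal arr i < pvVal arr (2*i+1)
          · have hir : pvVal arr i < pvVal arr (2*i+2) := lt_trans hil hlr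
            simp [h1, h2, hlr, hil, hir, show 2*i+1+1 = 2*i+2 from by omega,
                  show 2*i+2 ≠ i from by omega]
            exact ih _ _ _
          · by_cases hir : pvVal arr i < pvVal arr (2*i+2)
            · simp [h1, h2, hlr, hil, hir, show 2*i+1+1 = 2*i+2 from by omega,
                    show 2*i+2 ≠ i from by omega]
              exact ih _ _ _
            · simp [h1, h2, hlr, hil, hir, show 2*i+1+1 = 2*i+2 from by omega]
        · by_cases hil : pvVal arr i < pvVal arr (2*i+1)
          · simp [h1, h2, hlr, hil, show 2*i+1+1 = 2*i+2 from by omega,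
                  show 2*i+1 ≠ i from by omega]
            exact ih _ _ _
          · have hir : ¬ pvVal arr i < pvVal arr (2*i+2) := by
              intro h; exact hlr (lt_of_le_of_lt (not_lt.mp hil) h)
            simp [h1, h2, hlr, hil, hir, show 2*i+1+1 = 2*i+2 from by omega]
      · by_cases hil : pvVal arr i < pvVal arr (2*i+1)
        · simp [h1, h2, hil, show 2*i+1+1 = 2*i+2 from by omega,
                show 2*i+1 ≠ i from by omega]
          exact ih _ _ _
        · simp [h1, h2, hil, show 2*i+1+1 = 2*i+2 from by omega]
    · have h2 : ¬ 2*i+2 < n := by omega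
      simp [h1, h2]

theorem build_eq : ∀ (k n : Nat) (arr : List (List Int)),
    (List.range k).reverse.foldl (fun a i => heapifyA (n+1) a n i) arr = buildB n k arr := by
  intro k
  induction k with
  | zero => intro n arr; rfl
  | succ k ih =>
    intro n arr
    rw [List.range_succ, List.reverse_append]
    simp only [List.reverse_singleton, List.singleton_append, List.foldl_cons]
    rw [ih, buildB, sift_eq]

theorem extract_eq : ∀ (m : Nat) (arr : List (List Int)),
    (List.range' 1 m).reverse.foldl (fun a i => heapifyA (i+1) (pvSwap a i 0) i 0) arr
      = extractB m arr := by
  intro m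
  induction m with
  | zero => intro arr; rfl
  | succ m ih =>
    intro arr
    rw [List.range'_concat, List.reverse_append]
    simp only [List.reverse_singleton, List.singleton_append, List.foldl_cons]
    rw [ih, extractB, sift_eq]
    have e1 : 1 + 1 * m = m + 1 := by ring
    rw [e1, show m + 1 + 1 = m + 2 from by omega]

theorem heapSort_eq (arr : List (List Int)) : heapSortA arr = heapSortB arr := by
  simp only [heapSortA, heapSortB]
  rw [build_eq, extract_eq]

theorem filter_eq (start : Int) : ∀ (l : List (Int × Int)) (acc : List (List Int)),
    l.foldl (fun liste p => if p.2 > 0 ∨ p.1 = start then liste ++ [[p.1, p.2]] else liste) acc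
      = acc ++ (l.filter (fun p => decide (p.2 > 0) || decide (p.1 = start))).map
          (fun p => [p.1, p.2]) := by
  intro l
  induction l with
  | nil => intro acc; simp
  | cons p t ih =>
    intro acc
    simp only [List.foldl_cons, List.filter_cons]
    by_cases h : p.2 > 0 ∨ p.1 = start
    · have hb : (decide (p.2 > 0) || decide (p.1 = start)) = true := by
        rcases h with h | h <;> simp [h]
      simp only [if_pos h, hb, ih]
      simp
    · have hb : (decide (p.2 > 0) || decide (p.1 = start)) = false := by
        rw [not_or] at h; simp [h.1, h.2]
      simp only [if_neg h, hb, ih]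
      simp

-- ===== VERDICT (by name: the statement is the Claim_ definition above) =====
theorem order_level_spec : Claim_equal_order_level := by
  intro start dico_lvl _
  show order_level start dico_lvl = order_level_alt start dico_lvl
  simp only [order_level, order_level_alt]
  rw [filter_eq, List.nil_append, heapSort_eq]
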